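-- pv_equiv track=rewrite | github.com/ShawnShawnYou/FORM-Implement | preference_util.py | is_case_4
-- ===== SOURCE A (Python) =====
-- def is_case_4(preferences):
--     duplicated_set = set()
--     ret = True
--     for i in preferences:
--         if len(i) > 1:
--             ret = False
--             break
--         if len(i) == 1:
--             if i[0] in duplicated_set:
--                 ret = False
--                 break
--             else:
--                 duplicated_set.add(i[0])
--     return ret
-- ===== SOURCE B (Python) =====
-- def is_case_4(preferences):
--     if any(len(i) > 1 for i in preferences):
--         return False
--     singles = [i[0] for i in preferences if len(i) == 1]
--     return len(singles) == len(set(singles))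
-- ===== Notes on version B (the rewrite author's own statement) =====
-- stated objective: simpler
-- what changed: Replaced the single early-exit loop maintaining a running seen-set with a guard pass (any sublist longer than 1) followed by collecting singleton heads and comparing the list's length with its deduplicated length.
import Mathlib
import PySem

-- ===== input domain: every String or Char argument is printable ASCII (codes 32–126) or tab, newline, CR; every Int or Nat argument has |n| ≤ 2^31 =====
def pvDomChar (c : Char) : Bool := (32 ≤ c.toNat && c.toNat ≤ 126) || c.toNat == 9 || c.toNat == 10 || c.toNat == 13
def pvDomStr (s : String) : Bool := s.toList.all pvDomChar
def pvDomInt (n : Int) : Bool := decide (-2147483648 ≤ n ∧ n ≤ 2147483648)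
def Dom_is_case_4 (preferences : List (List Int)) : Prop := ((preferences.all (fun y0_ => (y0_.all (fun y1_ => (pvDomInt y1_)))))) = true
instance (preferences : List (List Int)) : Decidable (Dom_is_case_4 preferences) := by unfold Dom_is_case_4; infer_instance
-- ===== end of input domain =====

-- B changes the structure: a guard pass for long sublists, then a length-vs-dedup-length check; same cost, simpler.

-- ===== PORT A =====
-- the loop of A, with `break`/`ret = False` rendered as early-returning recursion over the
-- remaining list; `i[0]` is safe (taken only when len(i) == 1) and ported as headD 0
def isCase4Go : List (List Int) → PySem.Set Int → Bool
  | [], _ => true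
  | i :: rest, duplicatedSet =>
    if 1 < i.length then false
    else if i.length == 1 then
      if PySem.Set.contains duplicatedSet (i.headD 0) then false
      else isCase4Go rest (PySem.Set.add duplicatedSet (i.headD 0))
    else isCase4Go rest duplicatedSet

def is_case_4 (preferences : List (List Int)) : Bool :=
  isCase4Go preferences PySem.Set.empty

-- ===== PORT B =====
def is_case_4_alt (preferences : List (List Int)) : Bool :=
  if preferences.any (fun i => decide (1 < i.length)) then false
  else
    let singles := (preferences.filter (fun i => i.length == 1)).map (fun i => i.headD 0)
    decide (singles.length = (PySem.Set.ofList singles).length)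

-- ===== PRECONDITION & SPEC =====
def Spec_is_case_4 (preferences : List (List Int)) (out : Bool) : Prop := out = is_case_4_alt preferences
instance (preferences : List (List Int)) (out : Bool) : Decidable (Spec_is_case_4 preferences out) := by unfold Spec_is_case_4; infer_instance

-- ===== CLAIM (what is proved, stated in full; the proofs are below) =====
def Claim_equal_is_case_4 : Prop := ∀ (preferences : List (List Int)), Dom_is_case_4 preferences → Spec_is_case_4 preferences (is_case_4 preferences)

-- ===== LEMMAS AND PROOFS =====

-- the singleton heads of prefs, in order
def pvSingles (prefs : List (List Int)) : List Int :=
  (prefs.filter (fun i => i.length == 1)).map (fun i => i.headD 0)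

lemma set_add_mem (s : PySem.Set Int) (x y : Int) :
    y ∈ PySem.Set.add s x ↔ y ∈ s ∨ y = x := by
  simp only [PySem.Set.add, PySem.Set.contains]
  split_ifs with h <;> simp_all

lemma set_add_length (s : PySem.Set Int) (x : Int) :
    (PySem.Set.add s x).length = if x ∈ s then s.length else s.length + 1 := by
  simp only [PySem.Set.add, PySem.Set.contains]
  split_ifs with h h' h' <;> simp_all

lemma foldl_add_length (l : List Int) : ∀ (s : PySem.Set Int),
    (l.foldl PySem.Set.add s).length ≤ s.length + l.length ∧
      ((l.foldl PySem.Set.add s).length = s.length + l.length ↔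
        l.Nodup ∧ ∀ x ∈ l, x ∉ s) := by
  induction l with
  | nil => intro s; simp
  | cons a l ih =>
    intro s
    have hmem := set_add_mem s a
    have hlen := set_add_length s a
    rcases (ih (PySem.Set.add s a)) with ⟨hle, hiff⟩
    constructor
    · simp only [List.foldl_cons, List.length_cons]
      calc (l.foldl PySem.Set.add (PySem.Set.add s a)).length
          ≤ (PySem.Set.add s a).length + l.length := hle
        _ ≤ s.length + (l.length + 1) := by rw [hlen]; split_ifs <;> omega
    · simp only [List.foldl_cons, List.length_cons, List.nodup_cons, List.mem_cons]
      by_cases ha : a ∈ s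
      · rw [hlen, if_pos ha] at hiff hle
        constructor
        · intro h; omega
        · rintro ⟨_, h⟩; exact absurd ha (h a (Or.inl rfl))
      · rw [hlen, if_neg ha] at hiff hle
        rw [show List.length s + (l.length + 1) = List.length s + 1 + l.length by omega, hiff]
        constructor
        · rintro ⟨hnd, h⟩
          refine ⟨⟨fun hal => ?_, hnd⟩, ?_⟩
          · exact (h a hal) ((hmem a).2 (Or.inr rfl))
          · rintro x (rfl | hx)
            · exact ha
            · intro hxs
              exact (h x hx) ((hmem x).2 (Or.inl hxs))
        · rintro ⟨⟨hal, hnd⟩, h⟩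
          refine ⟨hnd, fun x hx hxs => ?_⟩
          rcases (hmem x).1 hxs with hxs | rfl
          · exact h x (Or.inr hx) hxs
          · exact hal hx

lemma ofList_length_eq_iff (l : List Int) :
    l.length = (PySem.Set.ofList l).length ↔ l.Nodup := by
  rw [PySem.Set.ofList_eq_foldl]
  rcases foldl_add_length l [] with ⟨_, hiff⟩
  simp only [List.length_nil, Nat.zero_add] at hiff
  constructor
  · intro h; exact (hiff.1 h.symm).1
  · intro h; exact (hiff.2 ⟨h, by simp⟩).symm

lemma go_iff (prefs : List (List Int)) : ∀ (seen : PySem.Set Int),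
    isCase4Go prefs seen = true ↔
      (∀ i ∈ prefs, i.length ≤ 1) ∧ (pvSingles prefs).Nodup ∧
        ∀ x ∈ pvSingles prefs, x ∉ seen := by
  induction prefs with
  | nil => intro seen; simp [isCase4Go, pvSingles]
  | cons i rest ih =>
    intro seen
    simp only [isCase4Go]
    split_ifs with hlong hone hc
    · constructor
      · intro h; cases h
      · rintro ⟨h, -⟩; have := h i (by simp); omega
    · -- i.length == 1, i[0] already seen: both sides false
      have hone' : i.length = 1 := by simpa using hone
      have hsing : pvSingles (i :: rest) = i.headD 0 :: pvSingles rest := by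
        simp [pvSingles, hone']
      have hmem : i.headD 0 ∈ seen := by simpa [PySem.Set.contains] using hc
      constructor
      · intro h; cases h
      · rintro ⟨-, -, h⟩
        exact absurd hmem (h _ (by simp [hsing]))
    · -- i.length == 1, new element
      have hone' : i.length = 1 := by simpa using hone
      have hsing : pvSingles (i :: rest) = i.headD 0 :: pvSingles rest := by
        simp [pvSingles, hone']
      have hnm : i.headD 0 ∉ seen := by simpa [PySem.Set.contains] using hc
      rw [ih]
      rw [hsing]
      simp only [List.mem_cons, List.nodup_cons]
      constructor
      · rintro ⟨h1, h2, h3⟩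
        have hhd : i.headD 0 ∉ pvSingles rest := fun hm =>
          (h3 _ hm) ((set_add_mem seen (i.headD 0) (i.headD 0)).2 (Or.inr rfl))
        refine ⟨?_, ⟨hhd, h2⟩, ?_⟩
        · rintro j (rfl | hj)
          · omega
          · exact h1 j hj
        · rintro x (rfl | hx)
          · exact hnm
          · exact fun hxs => (h3 x hx) ((set_add_mem seen (i.headD 0) x).2 (Or.inl hxs))
      · rintro ⟨h1, ⟨hhd, h2⟩, h3⟩
        refine ⟨fun j hj => h1 j (Or.inr hj), h2, fun x hx hxs => ?_⟩
        rcases (set_add_mem seen (i.headD 0) x).1 hxs with h | rfl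
        · exact h3 x (Or.inr hx) h
        · exact hhd hx
    · -- empty sublist
      have hzero : i.length = 0 := by
        have : ¬ i.length = 1 := by simpa using hone
        omega
      have hsing : pvSingles (i :: rest) = pvSingles rest := by
        simp [pvSingles, hzero]
      rw [ih, hsing]
      constructor
      · rintro ⟨h1, h2, h3⟩
        refine ⟨?_, h2, h3⟩
        rintro j hj
        rcases List.mem_cons.1 hj with rfl | hj
        · omega
        · exact h1 j hj
      · rintro ⟨h1, h2, h3⟩
        exact ⟨fun j hj => h1 j (List.mem_cons_of_mem _ hj), h2, h3⟩

-- ===== VERDICT (by name: the statement is the Claim_ definition above) =====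
theorem is_case_4_spec : Claim_equal_is_case_4 := by
  intro prefs _
  unfold Spec_is_case_4
  rw [Bool.eq_iff_iff]
  unfold is_case_4 is_case_4_alt
  rw [go_iff]
  by_cases hlong : prefs.any (fun i => decide (1 < i.length))
  · rw [if_pos hlong]
    simp only [List.any_eq_true, decide_eq_true_eq] at hlong
    rcases hlong with ⟨i, hi, hil⟩
    constructor
    · rintro ⟨h, -⟩; have := h i hi; omega
    · intro h; cases h
  · rw [if_neg hlong]
    simp only [List.any_eq_true, decide_eq_true_eq, not_exists, not_and] at hlong
    have hall : ∀ i ∈ prefs, i.length ≤ 1 := fun i hi => by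
      have := hlong i hi; omega
    have : ((prefs.filter (fun i => i.length == 1)).map (fun i => i.headD 0)) = pvSingles prefs := rfl
    rw [this, decide_eq_true_iff, ofList_length_eq_iff]
    constructor
    · rintro ⟨-, h2, -⟩; exact h2
    · intro h2
      exact ⟨hall, h2, by simp⟩
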